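-- pv_equiv track=rewrite | github.com/AJSilver00/Uni-Exercises | main.py | SmallestLHSet
-- ===== SOURCE A (Python) =====
-- def SmallestLHSet(pairs):
--     lst = list(pairs)
--     temp = []
--     for x in range(len(lst)):
--         element = list(lst[x])
--         temp.append(element[0])
--     smallestnum = min(temp)
--
--     for x in range(len(lst)):
--         element = list(lst[x])
--         if smallestnum == element[0]:
--             pair = tuple(element)
--             return pair
-- ===== SOURCE B (Python) =====
-- def SmallestLHSet(pairs):
--     return tuple(min(pairs, key=lambda p: p[0]))
-- ===== Notes on version B (the rewrite author's own statement) =====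
-- stated objective: idiomatic
-- what changed: Replaces A's two-pass scheme (build the list of first components, take its min, then rescan for the first matching pair) by a single keyed minimum min(pairs, key=lambda p: p[0]), which returns the first pair with the smallest first element directly.
import Mathlib
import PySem

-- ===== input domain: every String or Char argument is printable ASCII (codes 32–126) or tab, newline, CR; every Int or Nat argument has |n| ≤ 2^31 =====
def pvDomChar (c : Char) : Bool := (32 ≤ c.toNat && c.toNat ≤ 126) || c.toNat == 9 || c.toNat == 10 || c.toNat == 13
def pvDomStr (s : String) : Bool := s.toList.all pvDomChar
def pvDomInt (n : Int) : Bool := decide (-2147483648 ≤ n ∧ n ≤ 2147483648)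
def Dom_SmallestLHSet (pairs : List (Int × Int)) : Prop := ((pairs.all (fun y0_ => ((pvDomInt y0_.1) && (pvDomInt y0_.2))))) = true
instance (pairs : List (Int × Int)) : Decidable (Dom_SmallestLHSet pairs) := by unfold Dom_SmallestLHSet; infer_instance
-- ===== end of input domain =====

-- B: one keyed minimum (min with key = first component) instead of A's two passes
-- (collect first components, min them, rescan for the first matching pair); idiomatic, same O(n).


-- ===== PORT A =====
-- second loop of A: return the first pair whose first component equals s
-- (the [] case corresponds to Python falling off the loop and returning None; it is
-- unreachable because s is the minimum of the first components)
def pvScanA (s : Int) : List (Int × Int) → Int × Int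
  | [] => (0, 0)
  | p :: t => if s = p.1 then p else pvScanA s t

def SmallestLHSet (pairs : List (Int × Int)) : Int × Int :=
  let temp := pairs.map (fun p => p.1)       -- first loop: temp.append(element[0])
  match PySem.List.min? temp (fun x => x) with   -- smallestnum = min(temp); none = ValueError, excluded by Pre_
  | none => (0, 0)
  | some s => pvScanA s pairs

-- ===== PORT B =====
def SmallestLHSet_alt (pairs : List (Int × Int)) : Int × Int :=
  match PySem.List.min? pairs (fun p => p.1) with  -- min(pairs, key=lambda p: p[0]); none = ValueError, excluded by Pre_
  | some m => m
  | none => (0, 0)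

-- ===== PRECONDITION & SPEC =====
-- Pre_ excludes only the empty list, on which both Pythons raise ValueError (min of an empty sequence).
def Pre_SmallestLHSet (pairs : List (Int × Int)) : Prop := pairs ≠ []
instance (pairs : List (Int × Int)) : Decidable (Pre_SmallestLHSet pairs) := by unfold Pre_SmallestLHSet; infer_instance
def pvWitness_SmallestLHSet : (List (Int × Int)) := [(3, 4), (1, 2), (1, 9)]

def Spec_SmallestLHSet (pairs : List (Int × Int)) (out : Int × Int) : Prop := out = SmallestLHSet_alt pairs
instance (pairs : List (Int × Int)) (out : Int × Int) : Decidable (Spec_SmallestLHSet pairs out) := by unfold Spec_SmallestLHSet; infer_instance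

-- ===== CLAIM (what is proved, stated in full; the proofs are below) =====
def Claim_equal_SmallestLHSet : Prop := ∀ (pairs : List (Int × Int)), Dom_SmallestLHSet pairs → Pre_SmallestLHSet pairs → Spec_SmallestLHSet pairs (SmallestLHSet pairs)

-- ===== LEMMAS AND PROOFS =====

-- first-minimal of a :: t under the key Prod.fst, as a structural recursion
def pvMinD (a : Int × Int) : List (Int × Int) → Int × Int
  | [] => a
  | x :: t => if x.1 < a.1 then pvMinD x t else pvMinD a t

lemma minD_dichot (t : List (Int × Int)) (a : Int × Int) :
    pvMinD a t = a ∨ (pvMinD a t).1 < a.1 := by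
  induction t generalizing a with
  | nil => left; rfl
  | cons x t ih =>
    by_cases h : x.1 < a.1
    · right
      have := ih x
      simp only [pvMinD, if_pos h]
      rcases this with h1 | h1
      · rw [h1]; exact h
      · exact lt_trans h1 h
    · simp only [pvMinD, if_neg h]; exact ih a

lemma minD_fst_le (t : List (Int × Int)) (a : Int × Int) : (pvMinD a t).1 ≤ a.1 := by
  rcases minD_dichot t a with h | h
  · rw [h]
  · exact le_of_lt h

-- PySem.List.min? on a nonempty list is the pvMinD fold
lemma min?_fst_eq_minD (t : List (Int × Int)) (a : Int × Int) :
    PySem.List.min? (a :: t) (fun p => p.1) = some (pvMinD a t) := by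
  show List.foldl _ (some a) t = some (pvMinD a t)
  induction t generalizing a with
  | nil => rfl
  | cons x t ih =>
    simp only [List.foldl, pvMinD]
    by_cases h : x.1 < a.1
    · rw [if_pos h, if_pos h]; exact ih x
    · rw [if_neg h, if_neg h]; exact ih a

lemma min?_map_fst (pairs : List (Int × Int)) :
    PySem.List.min? (pairs.map (fun p => p.1)) (fun x => x)
      = (PySem.List.min? pairs (fun p => p.1)).map (fun p => p.1) := by
  show List.foldl _ ((none : Option (Int × Int)).map (fun q : Int × Int => q.1)) _
      = (List.foldl _ none pairs).map (fun q : Int × Int => q.1)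
  generalize (none : Option (Int × Int)) = acc
  induction pairs generalizing acc with
  | nil => rfl
  | cons p t ih =>
    simp only [List.map, List.foldl]
    cases acc with
    | none => exact ih (some p)
    | some m =>
      simp only [Option.map_some]
      by_cases h : p.1 < m.1
      · rw [if_pos h, if_pos h]; exact ih (some p)
      · rw [if_neg h, if_neg h]; exact ih (some m)

-- the cons-shaped form of the previous two lemmas, as it appears inside port A
lemma min_id_cons_map (a : Int × Int) (t : List (Int × Int)) :
    PySem.List.min? (a.1 :: t.map (fun p => p.1)) (fun x => x) = some (pvMinD a t).1 := by
  rw [show a.1 :: t.map (fun p => p.1) = (a :: t).map (fun p => p.1) from rfl,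
      min?_map_fst, min?_fst_eq_minD]
  rfl

-- the rescan of A finds exactly the first-minimal pair
lemma scanA_minD (t : List (Int × Int)) (a : Int × Int) :
    pvScanA (pvMinD a t).1 (a :: t) = pvMinD a t := by
  induction t generalizing a with
  | nil => simp [pvScanA, pvMinD]
  | cons x t ih =>
    by_cases h : x.1 < a.1
    · simp only [pvMinD, if_pos h]
      have hlt : (pvMinD x t).1 < a.1 := lt_of_le_of_lt (minD_fst_le t x) h
      have hne : ¬ (pvMinD x t).1 = a.1 := ne_of_lt hlt
      simp only [pvScanA, if_neg hne]
      exact ih x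
    · simp only [pvMinD, if_neg h]
      rcases minD_dichot t a with heq | hlt
      · rw [heq]; simp [pvScanA]
      · have hne : ¬ (pvMinD a t).1 = a.1 := ne_of_lt hlt
        have hxa : a.1 ≤ x.1 := le_of_not_gt h
        have hnex : ¬ (pvMinD a t).1 = x.1 := ne_of_lt (lt_of_lt_of_le hlt hxa)
        have hih := ih a
        simp only [pvScanA, if_neg hne] at hih ⊢
        rw [if_neg hnex]
        exact hih

-- ===== VERDICT (by name: the statement is the Claim_ definition above) =====
theorem SmallestLHSet_spec : Claim_equal_SmallestLHSet := by
  intro pairs _ hpre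
  cases pairs with
  | nil => exact absurd rfl hpre
  | cons a t =>
    show SmallestLHSet (a :: t) = SmallestLHSet_alt (a :: t)
    unfold SmallestLHSet SmallestLHSet_alt
    show (match PySem.List.min? (a.1 :: t.map (fun p => p.1)) (fun x => x) with
          | none => ((0 : Int), (0 : Int))
          | some s => pvScanA s (a :: t)) = _
    rw [min_id_cons_map, min?_fst_eq_minD]
    exact scanA_minD t a
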